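-- pv_equiv track=rewrite | github.com/thhung/query_reform | query_builder/query_builder.py | get_word_indices
-- ===== SOURCE A (Python) =====
-- def get_word_indices(s):
--     """
--     Get the start and end indices of each word in the string
--
--     Parameters:
--         s (str): Input string.
--
--     Returns:
--         list of tuples: Each tuple contains (start_index, end_index) for a word.
--     """
--     word_indices = []
--     n = len(s)
--     start_index = None
--
--     for i in range(n):
--         # Skip spaces
--         if s[i].isalnum():
--             if start_index is None:
--                 start_index = i  # Found the start of a word
--         else:
--             if start_index is not None:
--                 word_indices.append((start_index, i))  # End of the word
--                 start_index = None  # Reset for the next word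
--
--     # If the last word is not followed by a space
--     if start_index is not None:
--         word_indices.append((start_index, n))
--
--     return word_indices
-- ===== SOURCE B (Python) =====
-- def get_word_indices(s):
--     """Two-pointer scan: skip non-alnum chars, then scan each whole word at once."""
--     res = []
--     n = len(s)
--     i = 0
--     while i < n:
--         if s[i].isalnum():
--             j = i + 1
--             while j < n and s[j].isalnum():
--                 j += 1
--             res.append((i, j))
--             i = j
--         else:
--             i += 1
--     return res
-- ===== Notes on version B (the rewrite author's own statement) =====
-- stated objective: alternative
-- what changed: Replaces A's per-character state machine (Optional start_index sentinel plus a trailing-word fixup after the loop) with a two-pointer while loop that skips separators and consumes each maximal alnum run in an inner scan, emitting (i, j) immediately with no sentinel and no post-loop special case.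
import Mathlib
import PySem

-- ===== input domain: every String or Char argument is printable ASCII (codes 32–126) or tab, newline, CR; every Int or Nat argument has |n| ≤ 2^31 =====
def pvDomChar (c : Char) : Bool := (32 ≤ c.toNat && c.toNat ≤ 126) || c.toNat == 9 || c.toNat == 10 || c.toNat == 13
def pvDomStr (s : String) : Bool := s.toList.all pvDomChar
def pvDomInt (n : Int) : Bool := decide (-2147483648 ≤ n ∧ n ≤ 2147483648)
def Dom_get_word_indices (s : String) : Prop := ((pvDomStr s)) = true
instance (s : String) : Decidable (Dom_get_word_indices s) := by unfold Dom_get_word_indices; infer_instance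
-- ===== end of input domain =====

-- B replaces A's per-character state machine (start_index sentinel + trailing-word fixup)
-- with a two-pointer skip/scan loop; same cost, no sentinel and no post-loop special case.

-- ===== PORT A =====
-- loop body of A: state = (word_indices, start_index), input = (i, s[i])
def aStep (st : List (Int × Int) × Option Int) (p : Int × Char) :
    List (Int × Int) × Option Int :=
  if PySem.Chars.isalnum p.2 then
    match st.2 with
    | none => (st.1, some p.1)
    | some _ => st
  else
    match st.2 with
    | some start => (st.1 ++ [(start, p.1)], none)
    | none => st

def get_word_indices (s : String) : List (Int × Int) :=
  let n : Int := PySem.Str.len s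
  let r := (PySem.List.pyRange 0 n 1).foldl
    (fun st i => aStep st (i, PySem.List.pyGetD s.toList i ' ')) ([], none)
  match r.2 with
  | some start => r.1 ++ [(start, n)]
  | none => r.1

-- ===== PORT B =====
-- inner while loop of B: how many leading alnum chars (per-step: j += 1 while alnum)
def altRun : List Char → Nat
  | [] => 0
  | c :: rest => if PySem.Chars.isalnum c then altRun rest + 1 else 0

-- outer while loop of B over the remaining chars, i = current absolute index
def altGo : List Char → Int → List (Int × Int)
  | [], _ => []
  | c :: rest, i =>
    if PySem.Chars.isalnum c then
      let j : Int := i + 1 + (altRun rest : Int)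
      (i, j) :: altGo (rest.drop (altRun rest)) j
    else altGo rest (i + 1)
termination_by cs _ => cs.length
decreasing_by all_goals simp

def get_word_indices_alt (s : String) : List (Int × Int) := altGo s.toList 0

-- ===== PRECONDITION & SPEC =====
def Spec_get_word_indices (s : String) (out : List (Int × Int)) : Prop := out = get_word_indices_alt s
instance (s : String) (out : List (Int × Int)) : Decidable (Spec_get_word_indices s out) := by unfold Spec_get_word_indices; infer_instance

-- ===== CLAIM (what is proved, stated in full; the proofs are below) =====
def Claim_equal_get_word_indices : Prop := ∀ (s : String), Dom_get_word_indices s → Spec_get_word_indices s (get_word_indices s)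

-- ===== LEMMAS AND PROOFS =====

-- A's post-loop fixup applied to a final state, with n the string length
def finA (n : Int) (r : List (Int × Int) × Option Int) : List (Int × Int) :=
  match r.2 with
  | some start => r.1 ++ [(start, n)]
  | none => r.1

-- what the rest of B produces from a given A-state (none = between words, some a = inside a word begun at a)
def comb (o : Option Int) (cs : List Char) (i : Int) : List (Int × Int) :=
  match o with
  | none => altGo cs i
  | some a => (a, i + (altRun cs : Int)) :: altGo (cs.drop (altRun cs)) (i + (altRun cs : Int))

theorem key (cs : List Char) : ∀ (i : Int) (acc : List (Int × Int)) (o : Option Int),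
    finA (i + cs.length) ((PySem.List.enumerate cs i).foldl aStep (acc, o)) = acc ++ comb o cs i := by
  induction cs with
  | nil =>
    intro i acc o
    cases o <;> simp [finA, comb, altGo, altRun, PySem.List.enumerate_nil]
  | cons c rest ih =>
    intro i acc o
    rw [PySem.List.enumerate_cons]
    have hl : i + (((c :: rest).length : Int)) = (i + 1) + rest.length := by push_cast [List.length_cons]; ring
    rw [hl]
    by_cases h : PySem.Chars.isalnum c = true
    · rcases o with _ | a
      · simp only [List.foldl_cons, aStep, h, if_true]
        rw [ih (i + 1) acc (some i)]
        simp [comb, altGo, h]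
      · simp only [List.foldl_cons, aStep, h, if_true]
        rw [ih (i + 1) acc (some a)]
        simp [comb, altRun, h]
        constructor
        · ring
        · congr 1; ring
    · rcases o with _ | a
      · simp only [List.foldl_cons, aStep, h, Bool.false_eq_true, if_false]
        rw [ih (i + 1) acc none]
        simp [comb, altGo, h]
      · simp only [List.foldl_cons, aStep, h, Bool.false_eq_true, if_false]
        rw [ih (i + 1) (acc ++ [(a, i)]) none]
        simp [comb, altGo, altRun, h]

-- ===== VERDICT (by name: the statement is the Claim_ definition above) =====
theorem get_word_indices_spec : Claim_equal_get_word_indices := by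
  intro s _
  show get_word_indices s = get_word_indices_alt s
  simp only [get_word_indices, get_word_indices_alt, PySem.Str.len]
  have hfold : (PySem.List.enumerate s.toList 0).foldl aStep ([], none)
      = (PySem.List.pyRange 0 ((s.toList.length : Int)) 1).foldl
          (fun st i => aStep st (i, PySem.List.pyGetD s.toList i ' ')) ([], none) := by
    rw [PySem.List.enumerate_eq_map_pyRange s.toList ' ', List.foldl_map]
    simp
  rw [← hfold]
  have h2 := key s.toList 0 [] none
  simp only [zero_add, List.nil_append, finA, comb] at h2
  simpa using h2
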